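-- pv_equiv track=rewrite | github.com/BinglanLi/BaseAgent | template/src/parsers/uberon_parser.py | _parse_xrefs
-- ===== SOURCE A (Python) =====
-- def _parse_xrefs(xref_list):
--     """
--     Parse xref list and return (mesh_id, bto_id, fma_id) as pipe-delimited strings.
--     Handles MESH:, MSH:, MeSH:, BTO:, FMA: prefixes.
--     """
--     mesh_vals = []
--     bto_vals  = []
--     fma_vals  = []
--
--     for xref in xref_list:
--         xref_str = str(xref).strip()
--         upper    = xref_str.upper()
--         if upper.startswith("MESH:") or upper.startswith("MSH:"):
--             mesh_vals.append(xref_str)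
--         elif upper.startswith("BTO:"):
--             bto_vals.append(xref_str)
--         elif upper.startswith("FMA:"):
--             fma_vals.append(xref_str)
--
--     return (
--         "|".join(mesh_vals) if mesh_vals else "",
--         "|".join(bto_vals)  if bto_vals  else "",
--         "|".join(fma_vals)  if fma_vals  else "",
--     )
-- ===== SOURCE B (Python) =====
-- def _parse_xrefs(xref_list):
--     """Three independent filtering passes over the normalized list, one per prefix."""
--     items = [str(x).strip() for x in xref_list]
--     mesh = [s for s in items if s.upper().startswith(("MESH:", "MSH:"))]
--     bto  = [s for s in items if s.upper().startswith("BTO:")]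
--     fma  = [s for s in items if s.upper().startswith("FMA:")]
--     return ("|".join(mesh), "|".join(bto), "|".join(fma))
-- ===== Notes on version B (the rewrite author's own statement) =====
-- stated objective: simpler
-- what changed: Replaces the single branching elif-dispatch loop with three accumulators and empty-list guards by three independent filter passes over the normalized list, joined directly (join of an empty list is already '').
import Mathlib
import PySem

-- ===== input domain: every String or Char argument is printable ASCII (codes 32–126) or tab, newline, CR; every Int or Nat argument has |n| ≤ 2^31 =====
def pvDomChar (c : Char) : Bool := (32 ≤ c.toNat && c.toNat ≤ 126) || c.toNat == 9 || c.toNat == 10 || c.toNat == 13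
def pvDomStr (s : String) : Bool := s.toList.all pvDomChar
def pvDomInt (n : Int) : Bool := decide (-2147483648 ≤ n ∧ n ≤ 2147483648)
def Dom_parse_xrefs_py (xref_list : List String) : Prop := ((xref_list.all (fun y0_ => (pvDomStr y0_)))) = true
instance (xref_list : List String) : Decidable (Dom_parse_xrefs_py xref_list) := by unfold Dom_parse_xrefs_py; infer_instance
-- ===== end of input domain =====

-- B replaces A's single branching dispatch loop (three accumulators, empty guards) by
-- three independent filter passes joined directly (objective: simpler).

-- ===== PORT A =====
-- one pass; three accumulator lists, elif dispatch
def parse_xrefs_py (xref_list : List String) : String × String × String :=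
  let acc := xref_list.foldl (fun (acc : List String × List String × List String) xref =>
    let xref_str := PySem.Str.strip xref
    let upper := PySem.Str.upper xref_str
    if PySem.Str.startswith upper "MESH:" || PySem.Str.startswith upper "MSH:" then
      (acc.1 ++ [xref_str], acc.2.1, acc.2.2)
    else if PySem.Str.startswith upper "BTO:" then
      (acc.1, acc.2.1 ++ [xref_str], acc.2.2)
    else if PySem.Str.startswith upper "FMA:" then
      (acc.1, acc.2.1, acc.2.2 ++ [xref_str])
    else acc) ([], [], [])
  ((if acc.1.isEmpty then "" else PySem.Str.join "|" acc.1),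
   (if acc.2.1.isEmpty then "" else PySem.Str.join "|" acc.2.1),
   (if acc.2.2.isEmpty then "" else PySem.Str.join "|" acc.2.2))

-- ===== PORT B =====
def parse_xrefs_py_alt (xref_list : List String) : String × String × String :=
  let items := xref_list.map PySem.Str.strip
  (PySem.Str.join "|" (items.filter (fun s =>
     PySem.Str.startswith (PySem.Str.upper s) "MESH:" || PySem.Str.startswith (PySem.Str.upper s) "MSH:")),
   PySem.Str.join "|" (items.filter (fun s => PySem.Str.startswith (PySem.Str.upper s) "BTO:")),
   PySem.Str.join "|" (items.filter (fun s => PySem.Str.startswith (PySem.Str.upper s) "FMA:")))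

-- ===== PRECONDITION & SPEC =====
def Spec_parse_xrefs_py (xref_list : List String) (out : String × String × String) : Prop := out = parse_xrefs_py_alt xref_list
instance (xref_list : List String) (out : String × String × String) : Decidable (Spec_parse_xrefs_py xref_list out) := by unfold Spec_parse_xrefs_py; infer_instance

-- ===== CLAIM (what is proved, stated in full; the proofs are below) =====
def Claim_equal_parse_xrefs_py : Prop := ∀ (xref_list : List String), Dom_parse_xrefs_py xref_list → Spec_parse_xrefs_py xref_list (parse_xrefs_py xref_list)

-- ===== LEMMAS AND PROOFS =====

theorem pv_prefix_disj {p q : List Char} {l : List Char} (hp0 : p ≠ []) (hq0 : q ≠ [])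
    (hpq : p.head? ≠ q.head?)
    (hp : PySem.Chars.startswith l p = true) : PySem.Chars.startswith l q = false := by
  rw [PySem.Chars.startswith_iff] at hp
  by_contra h
  rw [Bool.not_eq_false, PySem.Chars.startswith_iff] at h
  obtain ⟨t, ht⟩ := hp
  obtain ⟨u, hu⟩ := h
  cases p with
  | nil => exact hp0 rfl
  | cons a as =>
    cases q with
    | nil => exact hq0 rfl
    | cons b bs =>
      subst ht
      simp at hu
      exact hpq (by simp [hu.1])

theorem pv_fold_inv (xs : List String) (m b f : List String) :
    xs.foldl (fun (acc : List String × List String × List String) xref =>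
      let xref_str := PySem.Str.strip xref
      let upper := PySem.Str.upper xref_str
      if PySem.Str.startswith upper "MESH:" || PySem.Str.startswith upper "MSH:" then
        (acc.1 ++ [xref_str], acc.2.1, acc.2.2)
      else if PySem.Str.startswith upper "BTO:" then
        (acc.1, acc.2.1 ++ [xref_str], acc.2.2)
      else if PySem.Str.startswith upper "FMA:" then
        (acc.1, acc.2.1, acc.2.2 ++ [xref_str])
      else acc) (m, b, f)
    = (m ++ (xs.map PySem.Str.strip).filter (fun s =>
         PySem.Str.startswith (PySem.Str.upper s) "MESH:" || PySem.Str.startswith (PySem.Str.upper s) "MSH:"),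
       b ++ (xs.map PySem.Str.strip).filter (fun s => PySem.Str.startswith (PySem.Str.upper s) "BTO:"),
       f ++ (xs.map PySem.Str.strip).filter (fun s => PySem.Str.startswith (PySem.Str.upper s) "FMA:")) := by
  induction xs generalizing m b f with
  | nil => simp
  | cons x xs ih =>
    simp only [List.foldl_cons, List.map_cons, List.filter_cons]
    set s := PySem.Str.strip x with hs
    by_cases hM : (PySem.Str.startswith (PySem.Str.upper s) "MESH:" || PySem.Str.startswith (PySem.Str.upper s) "MSH:") = true
    · have hB : PySem.Str.startswith (PySem.Str.upper s) "BTO:" = false := by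
        have hM' := hM
        rw [Bool.or_eq_true] at hM'
        rcases hM' with h | h
        · simpa using pv_prefix_disj (p := "MESH:".toList) (q := "BTO:".toList) (by decide) (by decide) (by decide) (by simpa using h)
        · simpa using pv_prefix_disj (p := "MSH:".toList) (q := "BTO:".toList) (by decide) (by decide) (by decide) (by simpa using h)
      have hF : PySem.Str.startswith (PySem.Str.upper s) "FMA:" = false := by
        have hM' := hM
        rw [Bool.or_eq_true] at hM'
        rcases hM' with h | h
        · simpa using pv_prefix_disj (p := "MESH:".toList) (q := "FMA:".toList) (by decide) (by decide) (by decide) (by simpa using h)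
        · simpa using pv_prefix_disj (p := "MSH:".toList) (q := "FMA:".toList) (by decide) (by decide) (by decide) (by simpa using h)
      simp only [hM, hB, hF, if_true, if_false, Bool.false_eq_true, ih]
      simp
    · simp only [Bool.not_eq_true] at hM
      by_cases hB : PySem.Str.startswith (PySem.Str.upper s) "BTO:" = true
      · have hF : PySem.Str.startswith (PySem.Str.upper s) "FMA:" = false := by
          simpa using pv_prefix_disj (p := "BTO:".toList) (q := "FMA:".toList) (by decide) (by decide) (by decide) (by simpa using hB)
        simp only [hM, hB, hF, if_true, if_false, Bool.false_eq_true, ih]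
        simp
      · simp only [Bool.not_eq_true] at hB
        by_cases hF : PySem.Str.startswith (PySem.Str.upper s) "FMA:" = true
        · simp only [hM, hB, hF, if_true, if_false, Bool.false_eq_true, ih]
          simp
        · simp only [Bool.not_eq_true] at hF
          simp only [hM, hB, hF, if_false, Bool.false_eq_true, ih]

theorem pv_join_empty_guard (l : List String) :
    (if l.isEmpty then "" else PySem.Str.join "|" l) = PySem.Str.join "|" l := by
  cases l with
  | nil => rfl
  | cons a as => rfl

-- ===== VERDICT (by name: the statement is the Claim_ definition above) =====
theorem parse_xrefs_py_spec : Claim_equal_parse_xrefs_py := by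
  intro xs _
  unfold Spec_parse_xrefs_py parse_xrefs_py parse_xrefs_py_alt
  rw [pv_fold_inv]
  simp only [pv_join_empty_guard, List.nil_append]
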